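-- pv_equiv track=rewrite | github.com/yuna1212/algorithm | 백준/분할 정복/색종이 만들기.py | getPiecesCount
-- ===== SOURCE A (Python) =====
-- import itertools
--
-- def findColor(piece):
--     # 조각의 색깔 찾는 함수
--     # return: piece가 1이면 1, 0이면 0, 섞여있으면 -1
--     flatten = list(itertools.chain(*piece))
--     pieceSum = sum(flatten)
--     if pieceSum == len(piece)**2:
--         return 1
--     elif pieceSum == 0:
--         return 0
--     else:
--         return -1
--
-- def slicePaper(paper):
--     # 주어진 종이를 4분할 하는 함수
--     n = len(paper)
--     pieces = [[] for _ in range(4)]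
--     for i in range(int(n/2)):
--         middle = int(n/2)
--         pieces[0].append(paper[i][:middle])
--         pieces[1].append(paper[i][middle:])
--         pieces[2].append(paper[middle+i][:middle])
--         pieces[3].append(paper[middle+i][middle:])
--     return pieces
--
-- def getPiecesCount(paper):
--     # return: [파란색 조각 개수, 하얀색 조각 개수]
--     # Base case
--     paperColor = findColor(paper)
--     if paperColor == 1:
--         return [1, 0]
--     elif paperColor == 0:
--         return [0, 1]
--
--     # Divide & Conquer
--     bluePieceCount = 0
--     whitePieceCount = 0
--     pieces = slicePaper(paper)
--     for piece in pieces: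
--         pieceColor = findColor(piece)
--         if pieceColor == 1:
--             bluePieceCount += 1
--         elif pieceColor == 0:
--             whitePieceCount += 1
--         else:
--             piecesColor = getPiecesCount(piece) # 재귀
--             bluePieceCount += piecesColor[0]
--             whitePieceCount += piecesColor[1]
--
--     return [bluePieceCount, whitePieceCount]
-- ===== SOURCE B (Python) =====
-- def getPiecesCount(paper):
--     # Iterative worklist instead of recursion: pop a piece, classify it by its total,
--     # or push its four half-size quadrant blocks; each piece is classified once.
--     blue = white = 0
--     stack = [paper]
--     while stack:
--         piece = stack.pop()
--         total = sum(map(sum, piece))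
--         n = len(piece)
--         if total == n * n:
--             blue += 1
--         elif total == 0:
--             white += 1
--         else:
--             m = n // 2
--             top, bottom = piece[:m], piece[m:m + m]
--             stack.append([row[:m] for row in top])
--             stack.append([row[m:] for row in top])
--             stack.append([row[:m] for row in bottom])
--             stack.append([row[m:] for row in bottom])
--     return [blue, white]
-- ===== Notes on version B (the rewrite author's own statement) =====
-- stated objective: alternative
-- what changed: replaces the recursion with its findColor/slicePaper helper passes (each sub-piece's colour is computed in the parent's loop and again at the recursive call, via an itertools.chain flatten) by a single iterative worklist loop that pops a piece, classifies it once by its row-sum total, or pushes its four quadrant blocks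
import Mathlib
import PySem

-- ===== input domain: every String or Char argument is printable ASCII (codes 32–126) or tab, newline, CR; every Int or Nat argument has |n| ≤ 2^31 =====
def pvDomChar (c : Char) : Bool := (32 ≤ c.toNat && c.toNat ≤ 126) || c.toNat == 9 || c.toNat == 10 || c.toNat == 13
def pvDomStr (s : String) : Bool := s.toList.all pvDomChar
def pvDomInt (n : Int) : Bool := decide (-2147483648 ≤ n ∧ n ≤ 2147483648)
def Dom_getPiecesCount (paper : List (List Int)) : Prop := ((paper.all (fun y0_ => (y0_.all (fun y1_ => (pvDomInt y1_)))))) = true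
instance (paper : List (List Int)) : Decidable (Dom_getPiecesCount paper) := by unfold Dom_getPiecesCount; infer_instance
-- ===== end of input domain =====

-- B replaces A's recursion with helper passes (findColor/slicePaper, each child's colour
-- computed twice) by one iterative worklist loop that pops a piece, classifies it once by
-- its row-sum total, or pushes its four quadrant blocks (objective: alternative).

-- ===== PORT A =====
def findColor (piece : List (List Int)) : Int :=
  let flatten := piece.flatten
  let pieceSum := flatten.sum
  if pieceSum = (piece.length : Int) ^ 2 then 1
  else if pieceSum = 0 then 0
  else -1

-- the 'for i in range(middle)' loop of slicePaper, building the four quadrant lists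
def sliceLoop (paper : List (List Int)) (middle : Nat) :
    List Nat → List (List Int) × List (List Int) × List (List Int) × List (List Int) →
    List (List Int) × List (List Int) × List (List Int) × List (List Int)
  | [], acc => acc
  | i :: rest, (p0, p1, p2, p3) =>
      sliceLoop paper middle rest
        (p0 ++ [(paper.getD i []).take middle],
         p1 ++ [(paper.getD i []).drop middle],
         p2 ++ [(paper.getD (middle + i) []).take middle],
         p3 ++ [(paper.getD (middle + i) []).drop middle])
-- paper[i] is ported as getD: every index the loop uses is in range; [:middle]/[middle:] with middle ≥ 0 are take/drop

def slicePaper (paper : List (List Int)) :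
    List (List Int) × List (List Int) × List (List Int) × List (List Int) :=
  let n := paper.length
  let middle := n / 2
  sliceLoop paper middle (List.range middle) ([], [], [], [])

-- A's recursion, made structural with a fuel counter (totality guard only: every call
-- keeps fuel ≥ paper.length, and the else-branch forces paper ≠ [], so fuel = 0 is unreachable)
def getPiecesCountF : Nat → List (List Int) → List Int
  | fuel, paper =>
    if findColor paper = 1 then [1, 0]
    else if findColor paper = 0 then [0, 1]
    else
      match fuel with
      | 0 => [0, 0]  -- unreachable
      | fuel + 1 =>
        let pieces := slicePaper paper
        let c0 : Int × Int :=
          if findColor pieces.1 = 1 then (1, 0)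
          else if findColor pieces.1 = 0 then (0, 1)
          else
            let pc := getPiecesCountF fuel pieces.1
            (pc.getD 0 0, pc.getD 1 0)
        let c1 : Int × Int :=
          if findColor pieces.2.1 = 1 then (1, 0)
          else if findColor pieces.2.1 = 0 then (0, 1)
          else
            let pc := getPiecesCountF fuel pieces.2.1
            (pc.getD 0 0, pc.getD 1 0)
        let c2 : Int × Int :=
          if findColor pieces.2.2.1 = 1 then (1, 0)
          else if findColor pieces.2.2.1 = 0 then (0, 1)
          else
            let pc := getPiecesCountF fuel pieces.2.2.1
            (pc.getD 0 0, pc.getD 1 0)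
        let c3 : Int × Int :=
          if findColor pieces.2.2.2 = 1 then (1, 0)
          else if findColor pieces.2.2.2 = 0 then (0, 1)
          else
            let pc := getPiecesCountF fuel pieces.2.2.2
            (pc.getD 0 0, pc.getD 1 0)
        [c0.1 + c1.1 + c2.1 + c3.1, c0.2 + c1.2 + c2.2 + c3.2]

def getPiecesCount (paper : List (List Int)) : List Int := getPiecesCountF paper.length paper

-- ===== PORT B =====
-- total = sum(map(sum, piece))
def totalOf (piece : List (List Int)) : Int := (piece.map List.sum).sum

-- fuel bound for the while loop (totality guard only: processing one piece with n rows
-- takes at most pieceFuel n loop iterations, so the guard branch is unreachable)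
def pieceFuel : Nat → Nat
  | 0 => 1
  | n + 1 => 1 + 4 * pieceFuel ((n + 1) / 2)

-- the 'while stack:' loop; the Lean list holds the Python stack top-first (pop = head,
-- the four appends become four conses, last-appended quadrant at the head)
def processF : Nat → List (List (List Int)) → Int → Int → Int × Int
  | 0, _, b, w => (b, w)  -- fuel exhausted: unreachable
  | _ + 1, [], b, w => (b, w)
  | fuel + 1, piece :: rest, b, w =>
      let total := totalOf piece
      let n := piece.length
      if total = (n : Int) * (n : Int) then processF fuel rest (b + 1) w
      else if total = 0 then processF fuel rest b (w + 1)
      else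
        let m := n / 2
        let top := piece.take m
        let btm := (piece.drop m).take m
        processF fuel
          (btm.map (fun row => row.drop m) :: btm.map (fun row => row.take m) ::
           top.map (fun row => row.drop m) :: top.map (fun row => row.take m) :: rest) b w

def getPiecesCount_alt (paper : List (List Int)) : List Int :=
  let bw := processF (pieceFuel paper.length) [paper] 0 0
  [bw.1, bw.2]

-- ===== PRECONDITION & SPEC =====
def Spec_getPiecesCount (paper : List (List Int)) (out : List Int) : Prop := out = getPiecesCount_alt paper
instance (paper : List (List Int)) (out : List Int) : Decidable (Spec_getPiecesCount paper out) := by unfold Spec_getPiecesCount; infer_instance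

-- ===== CLAIM (what is proved, stated in full; the proofs are below) =====
def Claim_equal_getPiecesCount : Prop := ∀ (paper : List (List Int)), Dom_getPiecesCount paper → Spec_getPiecesCount paper (getPiecesCount paper)

-- ===== LEMMAS AND PROOFS =====

theorem findColor_nil : findColor [] = 1 := by decide

-- the common recursion tree, as a well-founded count: the value both programs compute
def cnt (q : List (List Int)) : Int × Int :=
  if _h1 : findColor q = 1 then (1, 0)
  else if _h0 : findColor q = 0 then (0, 1)
  else
    let m := q.length / 2
    let p0 := cnt ((q.take m).map (fun row => row.take m))
    let p1 := cnt ((q.take m).map (fun row => row.drop m))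
    let p2 := cnt (((q.drop m).take m).map (fun row => row.take m))
    let p3 := cnt (((q.drop m).take m).map (fun row => row.drop m))
    (p0.1 + p1.1 + p2.1 + p3.1, p0.2 + p1.2 + p2.2 + p3.2)
termination_by q.length
decreasing_by
  all_goals
    simp only [List.length_map, List.length_take, List.length_drop]
    have hq : q.length ≠ 0 := by
      intro h
      exact _h1 (by rw [List.length_eq_zero_iff.mp h]; exact findColor_nil)
    omega

-- the contribution of one piece inside A's loop body
def pieceContrib (fuel : Nat) (piece : List (List Int)) : Int × Int :=
  if findColor piece = 1 then (1, 0)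
  else if findColor piece = 0 then (0, 1)
  else ((getPiecesCountF fuel piece).getD 0 0, (getPiecesCountF fuel piece).getD 1 0)

theorem sliceLoop_spec (paper : List (List Int)) (middle : Nat) : ∀ (l : List Nat)
    (acc : List (List Int) × List (List Int) × List (List Int) × List (List Int)),
    sliceLoop paper middle l acc =
      (acc.1 ++ l.map (fun i => (paper.getD i []).take middle),
       acc.2.1 ++ l.map (fun i => (paper.getD i []).drop middle),
       acc.2.2.1 ++ l.map (fun i => (paper.getD (middle + i) []).take middle),
       acc.2.2.2 ++ l.map (fun i => (paper.getD (middle + i) []).drop middle)) := by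
  intro l
  induction l with
  | nil => intro acc; simp [sliceLoop]
  | cons i rest ih =>
      intro acc
      obtain ⟨p0, p1, p2, p3⟩ := acc
      simp only [sliceLoop, ih, List.map_cons]
      simp [List.append_assoc]

theorem dropTake_as_mapRange (p : List (List Int)) (r s : Nat) (hb : r + s ≤ p.length) :
    (p.drop r).take s = (List.range s).map (fun i => p.getD (r + i) []) := by
  apply List.ext_getElem
  · simp
    omega
  · intro i h1 h2
    have hi : i < s := by simpa using h2
    simp only [List.getElem_map, List.getElem_range, List.getElem_take, List.getElem_drop]
    rw [List.getD_eq_getElem p [] (by omega)]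

-- A's slicePaper produces exactly B's four quadrant blocks
theorem slicePaper_children (q : List (List Int)) :
    slicePaper q =
      ((q.take (q.length / 2)).map (fun row => row.take (q.length / 2)),
       (q.take (q.length / 2)).map (fun row => row.drop (q.length / 2)),
       ((q.drop (q.length / 2)).take (q.length / 2)).map (fun row => row.take (q.length / 2)),
       ((q.drop (q.length / 2)).take (q.length / 2)).map (fun row => row.drop (q.length / 2))) := by
  have hm : q.length / 2 + q.length / 2 ≤ q.length := by omega
  have htop : q.take (q.length / 2) = (List.range (q.length / 2)).map (fun i => q.getD i []) := by
    have h := dropTake_as_mapRange q 0 (q.length / 2) (by omega)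
    simpa using h
  have hbtm : (q.drop (q.length / 2)).take (q.length / 2)
      = (List.range (q.length / 2)).map (fun i => q.getD (q.length / 2 + i) []) :=
    dropTake_as_mapRange q (q.length / 2) (q.length / 2) hm
  unfold slicePaper
  rw [sliceLoop_spec]
  simp only [List.nil_append]
  rw [htop, hbtm]
  simp [List.map_map, Function.comp]

theorem getPiecesCountF_blue (fuel : Nat) (q : List (List Int)) (h : findColor q = 1) :
    getPiecesCountF fuel q = [1, 0] := by
  cases fuel <;> simp [getPiecesCountF, h]

theorem getPiecesCountF_white (fuel : Nat) (q : List (List Int))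
    (h0 : findColor q = 0) : getPiecesCountF fuel q = [0, 1] := by
  cases fuel <;> simp [getPiecesCountF, h0]

theorem getPiecesCountF_else (fuel : Nat) (q : List (List Int))
    (h1 : findColor q ≠ 1) (h0 : findColor q ≠ 0) :
    getPiecesCountF (fuel + 1) q =
      [(pieceContrib fuel (slicePaper q).1).1 + (pieceContrib fuel (slicePaper q).2.1).1 +
        (pieceContrib fuel (slicePaper q).2.2.1).1 + (pieceContrib fuel (slicePaper q).2.2.2).1,
       (pieceContrib fuel (slicePaper q).1).2 + (pieceContrib fuel (slicePaper q).2.1).2 +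
        (pieceContrib fuel (slicePaper q).2.2.1).2 + (pieceContrib fuel (slicePaper q).2.2.2).2] := by
  conv_lhs => rw [getPiecesCountF]
  rw [if_neg h1, if_neg h0]
  rfl

theorem cnt_blue (q : List (List Int)) (h : findColor q = 1) : cnt q = (1, 0) := by
  rw [cnt]; simp [h]

theorem cnt_white (q : List (List Int)) (h1 : findColor q ≠ 1) (h0 : findColor q = 0) :
    cnt q = (0, 1) := by
  rw [cnt]; simp [h0]

theorem cnt_else (q : List (List Int)) (h1 : findColor q ≠ 1) (h0 : findColor q ≠ 0) :
    cnt q =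
      ((cnt ((q.take (q.length / 2)).map (fun row => row.take (q.length / 2)))).1 +
        (cnt ((q.take (q.length / 2)).map (fun row => row.drop (q.length / 2)))).1 +
        (cnt (((q.drop (q.length / 2)).take (q.length / 2)).map (fun row => row.take (q.length / 2)))).1 +
        (cnt (((q.drop (q.length / 2)).take (q.length / 2)).map (fun row => row.drop (q.length / 2)))).1,
       (cnt ((q.take (q.length / 2)).map (fun row => row.take (q.length / 2)))).2 +
        (cnt ((q.take (q.length / 2)).map (fun row => row.drop (q.length / 2)))).2 +
        (cnt (((q.drop (q.length / 2)).take (q.length / 2)).map (fun row => row.take (q.length / 2)))).2 +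
        (cnt (((q.drop (q.length / 2)).take (q.length / 2)).map (fun row => row.drop (q.length / 2)))).2) := by
  conv_lhs => rw [cnt]
  rw [dif_neg h1, dif_neg h0]

-- A computes cnt
theorem A_eq_cnt : ∀ (fa : Nat) (q : List (List Int)), q.length ≤ fa →
    getPiecesCountF fa q = [(cnt q).1, (cnt q).2] := by
  intro fa
  induction fa with
  | zero =>
      intro q hq
      have : q = [] := List.length_eq_zero_iff.mp (by omega)
      subst this
      rw [getPiecesCountF_blue _ _ findColor_nil, cnt_blue _ findColor_nil]
  | succ fa ih =>
      intro q hq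
      by_cases h1 : findColor q = 1
      · rw [getPiecesCountF_blue _ _ h1, cnt_blue _ h1]
      by_cases h0 : findColor q = 0
      · rw [getPiecesCountF_white _ _ h0, cnt_white _ h1 h0]
      have hq0 : q.length ≠ 0 := by
        intro h
        exact h1 (by rw [List.length_eq_zero_iff.mp h]; exact findColor_nil)
      have quad : ∀ piece : List (List Int), piece.length ≤ q.length / 2 →
          pieceContrib fa piece = cnt piece := by
        intro piece hlen
        by_cases f1 : findColor piece = 1
        · simp [pieceContrib, f1, cnt_blue _ f1]
        by_cases f0 : findColor piece = 0
        · simp [pieceContrib, f0, cnt_white _ f1 f0]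
        · have := ih piece (by omega)
          simp [pieceContrib, f1, f0, this]
      rw [getPiecesCountF_else fa q h1 h0, cnt_else q h1 h0, slicePaper_children q]
      dsimp only
      rw [quad _ (by simp), quad _ (by simp), quad _ (by simp), quad _ (by simp)]

theorem pieceFuel_pos (n : Nat) : 0 < pieceFuel n := by
  cases n <;> simp [pieceFuel]

theorem pieceFuel_succ (n : Nat) (h : n ≠ 0) : pieceFuel n = 1 + 4 * pieceFuel (n / 2) := by
  cases n with
  | zero => omega
  | succ k => rw [pieceFuel]

def stackMeasure (st : List (List (List Int))) : Nat :=
  (st.map (fun q => pieceFuel q.length)).sum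

theorem totalOf_eq (q : List (List Int)) : q.flatten.sum = totalOf q := by
  simp [totalOf, List.sum_flatten]

-- findColor through B's test quantities
theorem findColor_eq (q : List (List Int)) :
    findColor q = if totalOf q = (q.length : Int) * (q.length : Int) then 1
      else if totalOf q = 0 then 0 else -1 := by
  simp only [findColor, totalOf_eq]
  rw [show ((q.length : Int)) ^ 2 = (q.length : Int) * (q.length : Int) from by ring]

-- B's worklist loop computes the sum of cnt over the stack, given enough fuel
theorem processF_spec : ∀ (fuel : Nat) (st : List (List (List Int))) (b w : Int),
    stackMeasure st ≤ fuel →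
    processF fuel st b w =
      (b + (st.map (fun q => (cnt q).1)).sum, w + (st.map (fun q => (cnt q).2)).sum) := by
  intro fuel
  induction fuel with
  | zero =>
      intro st b w hm
      cases st with
      | nil => simp [processF]
      | cons piece rest =>
          exfalso
          have := pieceFuel_pos piece.length
          simp [stackMeasure] at hm
          omega
  | succ fuel ih =>
      intro st b w hm
      cases st with
      | nil => simp [processF]
      | cons piece rest =>
          have hms : pieceFuel piece.length + stackMeasure rest ≤ fuel + 1 := by
            simpa [stackMeasure] using hm
          have hp1 := pieceFuel_pos piece.length
          by_cases h1 : totalOf piece = (piece.length : Int) * (piece.length : Int)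
          · have hf : findColor piece = 1 := by rw [findColor_eq, if_pos h1]
            rw [show processF (fuel + 1) (piece :: rest) b w = processF fuel rest (b + 1) w from by
                  simp only [processF]; rw [if_pos h1]]
            rw [ih rest (b + 1) w (by omega)]
            simp only [List.map_cons, List.sum_cons]
            rw [cnt_blue _ hf]
            refine Prod.ext ?_ ?_ <;> dsimp only <;> ring
          · by_cases h0 : totalOf piece = 0
            · have hf1 : findColor piece ≠ 1 := by rw [findColor_eq, if_neg h1, if_pos h0]; decide
              have hf : findColor piece = 0 := by rw [findColor_eq, if_neg h1, if_pos h0]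
              rw [show processF (fuel + 1) (piece :: rest) b w = processF fuel rest b (w + 1) from by
                    simp only [processF]; rw [if_neg h1, if_pos h0]]
              rw [ih rest b (w + 1) (by omega)]
              simp only [List.map_cons, List.sum_cons]
              rw [cnt_white _ hf1 hf]
              refine Prod.ext ?_ ?_ <;> dsimp only <;> ring
            · have hf1 : findColor piece ≠ 1 := by
                rw [findColor_eq, if_neg h1, if_neg h0]; decide
              have hf0 : findColor piece ≠ 0 := by
                rw [findColor_eq, if_neg h1, if_neg h0]; decide
              have hn0 : piece.length ≠ 0 := by
                intro h
                apply h1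
                have : piece = [] := List.length_eq_zero_iff.mp h
                subst this
                simp [totalOf]
              set m := piece.length / 2 with hmdef
              have hlen_top : (piece.take m).length = m := by simp; omega
              have hlen_btm : ((piece.drop m).take m).length = m := by simp; omega
              have hstep : processF (fuel + 1) (piece :: rest) b w =
                  processF fuel
                    (((piece.drop m).take m).map (fun row => row.drop m) ::
                     ((piece.drop m).take m).map (fun row => row.take m) ::
                     (piece.take m).map (fun row => row.drop m) ::
                     (piece.take m).map (fun row => row.take m) :: rest) b w := by
                simp only [processF]
                rw [if_neg h1, if_neg h0]
              have hmeas : stackMeasure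
                  (((piece.drop m).take m).map (fun row => row.drop m) ::
                   ((piece.drop m).take m).map (fun row => row.take m) ::
                   (piece.take m).map (fun row => row.drop m) ::
                   (piece.take m).map (fun row => row.take m) :: rest) ≤ fuel := by
                simp only [stackMeasure, List.map_cons, List.sum_cons, List.length_map,
                  hlen_top, hlen_btm]
                have := pieceFuel_succ piece.length hn0
                rw [← hmdef] at this
                simp only [stackMeasure] at hms ⊢
                omega
              rw [hstep, ih _ b w hmeas]
              simp only [List.map_cons, List.sum_cons]
              rw [cnt_else piece hf1 hf0, ← hmdef]
              refine Prod.ext ?_ ?_ <;> dsimp only <;> ring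
          
-- ===== VERDICT (by name: the statement is the Claim_ definition above) =====
theorem getPiecesCount_spec : Claim_equal_getPiecesCount := by
  unfold Claim_equal_getPiecesCount
  intro paper _
  unfold Spec_getPiecesCount
  have hA := A_eq_cnt paper.length paper le_rfl
  have hB := processF_spec (pieceFuel paper.length) [paper] 0 0
    (by simp [stackMeasure])
  simp only [List.map_cons, List.map_nil, List.sum_cons, List.sum_nil] at hB
  simp [getPiecesCount, getPiecesCount_alt, hA, hB]
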